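-- pv_equiv track=rewrite | github.com/arbazkhan002/MTT | UniMelb/test/bin/wordclass.py | get_brief_word_class
-- ===== SOURCE A (Python) =====
-- char_lower = "a"
--
-- char_upper = "A"
--
-- number = "0"
--
-- other = "_"
--
-- def get_brief_word_class(token):
--     ret = ""
--     for c in token:
--         if c.isalpha():
--             if c.islower():
--                 ret = __append_char__(ret, char_lower)
--             else:
--                 ret = __append_char__(ret, char_upper)
--         elif c.isdigit():
--             ret = __append_char__(ret, number)
--         else:
--             ret = __append_char__(ret, other)
--     return ret
--
-- def __append_char__(ret, char):
--     if len(ret) > 0 and ret[-1] == char: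
--         return ret
--     else:
--         ret += char
--         return ret
-- ===== SOURCE B (Python) =====
-- char_lower = "a"
-- char_upper = "A"
-- number = "0"
-- other = "_"
--
--
-- def _marker(c):
--     if c.isalpha():
--         return char_lower if c.islower() else char_upper
--     elif c.isdigit():
--         return number
--     else:
--         return other
--
--
-- def get_brief_word_class(token):
--     # Boundary detection on the INPUT: zip the token with itself shifted by one
--     # and keep a marker only at positions where the class changes.
--     prevs = [None] + list(token)
--     return "".join(_marker(c) for p, c in zip(prevs, token)
--                    if p is None or _marker(p) != _marker(c))
-- ===== Notes on version B (the rewrite author's own statement) =====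
-- stated objective: alternative
-- what changed: A builds the output incrementally, suppressing duplicates by peeking at the last emitted output char; B never inspects its output: it zips the token with itself shifted by one and emits a marker only at input positions where the character class differs from the predecessor's (boundary detection), joining in one pass.
import Mathlib
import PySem

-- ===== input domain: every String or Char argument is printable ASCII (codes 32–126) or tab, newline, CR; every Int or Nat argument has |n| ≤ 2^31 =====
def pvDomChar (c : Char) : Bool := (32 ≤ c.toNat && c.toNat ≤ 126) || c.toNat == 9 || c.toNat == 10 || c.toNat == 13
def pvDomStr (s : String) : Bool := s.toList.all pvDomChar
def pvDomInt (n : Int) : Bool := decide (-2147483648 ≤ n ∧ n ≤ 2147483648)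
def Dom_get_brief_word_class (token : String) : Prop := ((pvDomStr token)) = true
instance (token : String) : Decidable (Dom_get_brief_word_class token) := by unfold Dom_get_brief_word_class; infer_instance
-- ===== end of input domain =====

-- B detects class-change boundaries by zipping the token with itself shifted by one,
-- emitting a marker only where the class differs from the predecessor's; same value.

-- ===== PORT A =====
-- __append_char__(ret, char)
def pvAppendChar (ret : List Char) (c : Char) : List Char :=
  if ret.length > 0 ∧ ret.getLast? = some c then ret else ret ++ [c]

def get_brief_word_class (token : String) : String :=
  String.ofList (token.toList.foldl (fun ret c =>
    if PySem.Chars.isalpha c then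
      if PySem.Chars.islower c then pvAppendChar ret 'a'
      else pvAppendChar ret 'A'
    else if PySem.Chars.isdigit c then pvAppendChar ret '0'
    else pvAppendChar ret '_') [])

-- ===== PORT B =====
def pvMarker (c : Char) : Char :=
  if PySem.Chars.isalpha c then
    (if PySem.Chars.islower c then 'a' else 'A')
  else if PySem.Chars.isdigit c then '0'
  else '_'

-- zip(prevs, token) with prevs = [None] + list(token); keep class-change boundaries
def get_brief_word_class_alt (token : String) : String :=
  let cs := token.toList
  String.ofList ((((none :: cs.map some).zip cs).filter
      (fun pc => match pc.1 with
        | none => true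
        | some p => pvMarker p != pvMarker pc.2)).map (fun pc => pvMarker pc.2))

-- ===== PRECONDITION & SPEC =====
def Spec_get_brief_word_class (token : String) (out : String) : Prop := out = get_brief_word_class_alt token
instance (token : String) (out : String) : Decidable (Spec_get_brief_word_class token out) := by unfold Spec_get_brief_word_class; infer_instance

-- ===== CLAIM (what is proved, stated in full; the proofs are below) =====
def Claim_equal_get_brief_word_class : Prop := ∀ (token : String), Dom_get_brief_word_class token → Spec_get_brief_word_class token (get_brief_word_class token)

-- ===== LEMMAS AND PROOFS =====

-- what A's fold still emits given the last emitted marker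
def pvCF : Option Char → List Char → List Char
  | _, [] => []
  | last, m :: ms => if last = some m then pvCF last ms else m :: pvCF (some m) ms

-- proof-side view of B: previous CHAR instead of previous marker
def pvG : Option Char → List Char → List Char
  | _, [] => []
  | p, c :: cs =>
    if (match p with | none => true | some p => pvMarker p ≠ pvMarker c)
    then pvMarker c :: pvG (some c) cs else pvG (some c) cs

theorem pvAppendChar_eq (ret : List Char) (c : Char) :
    pvAppendChar ret c = if ret.getLast? = some c then ret else ret ++ [c] := by
  unfold pvAppendChar
  cases ret with
  | nil => simp
  | cons x xs => simp

theorem foldl_eq_cf (ms : List Char) : ∀ (acc : List Char),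
    ms.foldl pvAppendChar acc = acc ++ pvCF acc.getLast? ms := by
  induction ms with
  | nil => intro acc; simp [pvCF]
  | cons m ms ih =>
    intro acc
    simp only [List.foldl_cons, pvAppendChar_eq, pvCF]
    by_cases h : acc.getLast? = some m
    · simp [h, ih acc]
    · simp [h, ih (acc ++ [m])]

theorem body_eq_marker (ret : List Char) (c : Char) :
    (if PySem.Chars.isalpha c then
      if PySem.Chars.islower c then pvAppendChar ret 'a'
      else pvAppendChar ret 'A'
    else if PySem.Chars.isdigit c then pvAppendChar ret '0'
    else pvAppendChar ret '_') = pvAppendChar ret (pvMarker c) := by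
  unfold pvMarker
  split_ifs <;> rfl

-- A's remaining emission after char c equals B's recursion with previous char c
theorem cf_eq_g (cs : List Char) : ∀ (c : Char),
    pvCF (some (pvMarker c)) (cs.map pvMarker) = pvG (some c) cs := by
  induction cs with
  | nil => intro c; rfl
  | cons d cs ih =>
    intro c
    by_cases h : pvMarker c = pvMarker d
    · simp [pvCF, pvG, h, ih d]
    · simp [pvCF, pvG, h, Ne.symm h, ih d]

theorem cf_none_eq_g (cs : List Char) :
    pvCF none (cs.map pvMarker) = pvG none cs := by
  cases cs with
  | nil => rfl
  | cons c cs => simp [pvCF, pvG, cf_eq_g cs c]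

-- B's zip/filter/map equals pvG
theorem zip_eq_g (cs : List Char) : ∀ (p : Option Char),
    (((p :: cs.map some).zip cs).filter
      (fun pc => match pc.1 with
        | none => true
        | some q => pvMarker q != pvMarker pc.2)).map (fun pc => pvMarker pc.2)
    = pvG p cs := by
  induction cs with
  | nil => intro p; rfl
  | cons c cs ih =>
    intro p
    cases p with
    | none => simp [pvG, ih (some c)]
    | some q =>
      by_cases h : pvMarker q = pvMarker c
      · simp [pvG, h, ih (some c)]
      · simp [pvG, h, ih (some c)]

-- ===== VERDICT (by name: the statement is the Claim_ definition above) =====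
theorem get_brief_word_class_spec : Claim_equal_get_brief_word_class := by
  intro token _
  unfold Spec_get_brief_word_class get_brief_word_class get_brief_word_class_alt
  have h1 : token.toList.foldl (fun ret c =>
      if PySem.Chars.isalpha c then
        if PySem.Chars.islower c then pvAppendChar ret 'a'
        else pvAppendChar ret 'A'
      else if PySem.Chars.isdigit c then pvAppendChar ret '0'
      else pvAppendChar ret '_') [] =
      (token.toList.map pvMarker).foldl pvAppendChar [] := by
    rw [List.foldl_map]
    exact PySem.List.foldl_congr_mem _ _ _ _ (fun acc c _ => body_eq_marker acc c)
  rw [h1, foldl_eq_cf]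
  simp [cf_none_eq_g, zip_eq_g]
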